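-- pv_equiv track=rewrite | github.com/neufdegres/cix-pics-bot | parsing.py | find_duo_trio
-- ===== SOURCE A (Python) =====
-- def find_duo_trio(members):
--     asked = {1:False, 2:False, 3:False, 4:False, 5:False}
--     for m in members :
--         if m > 0 and m <= 5:
--             asked[m] = True
--         else :
--             return None
--     res = ""
--     for key, value in asked.items() :
--         if value == True:
--             res += str(key)
--     return res
-- ===== SOURCE B (Python) =====
-- def find_duo_trio(members):
--     present = sorted(set(members))
--     if any(not (0 < m <= 5) for m in present):
--         return None
--     return ''.join(map(str, present))
-- ===== Notes on version B (the rewrite author's own statement) =====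
-- stated objective: idiomatic
-- what changed: Instead of marking a fixed 5-slot boolean dict and then scanning its keys, B deduplicates via set(), sorts the distinct members, validates that sorted list, and joins it directly - no marking table and no 1..5 key scan.
import Mathlib
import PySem

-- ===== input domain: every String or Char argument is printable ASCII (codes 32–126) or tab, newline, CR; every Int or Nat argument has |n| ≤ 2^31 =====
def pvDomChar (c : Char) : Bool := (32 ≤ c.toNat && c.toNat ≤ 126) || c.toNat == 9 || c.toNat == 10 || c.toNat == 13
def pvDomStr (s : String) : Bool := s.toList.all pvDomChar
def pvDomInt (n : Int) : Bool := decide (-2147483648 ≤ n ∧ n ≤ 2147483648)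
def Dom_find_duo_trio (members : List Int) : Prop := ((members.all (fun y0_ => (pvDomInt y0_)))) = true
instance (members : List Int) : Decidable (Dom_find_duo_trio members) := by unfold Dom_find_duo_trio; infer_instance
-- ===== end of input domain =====

-- B replaces A's mutated 5-slot boolean dict and key scan by dedup via set(), sort,
-- then validate-and-join the sorted distinct members (objective: idiomatic).

-- ===== PORT A =====
-- the first 'for m in members' loop, with its early 'return None'
def pvLoopA : List Int → PySem.Dict Int Bool → Option (PySem.Dict Int Bool)
  | [], asked => some asked
  | m :: rest, asked =>
      if m > 0 ∧ m ≤ 5 then pvLoopA rest (asked.insert m true) else none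

def find_duo_trio (members : List Int) : Option String :=
  match pvLoopA members (PySem.Dict.ofList [(1, false), (2, false), (3, false), (4, false), (5, false)]) with
  | none => none
  | some asked =>
      some (asked.items.foldl (fun res kv => if kv.2 == true then res ++ PySem.Int.toStr kv.1 else res) "")

-- ===== PORT B =====
def find_duo_trio_alt (members : List Int) : Option String :=
  let present := PySem.List.sorted (PySem.Set.ofList members) (fun x => x) false
  if present.any (fun m => !(0 < m && m ≤ 5)) then none
  else some (String.join (present.map (fun m => PySem.Int.toStr m)))

-- ===== PRECONDITION & SPEC =====
def Spec_find_duo_trio (members : List Int) (out : Option String) : Prop := out = find_duo_trio_alt members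
instance (members : List Int) (out : Option String) : Decidable (Spec_find_duo_trio members out) := by unfold Spec_find_duo_trio; infer_instance

-- ===== CLAIM (what is proved, stated in full; the proofs are below) =====
def Claim_equal_find_duo_trio : Prop := ∀ (members : List Int), Dom_find_duo_trio members → Spec_find_duo_trio members (find_duo_trio members)

-- ===== LEMMAS AND PROOFS =====

-- After the first loop finishes without returning None, the dict keeps its five keys in
-- order and slot k holds vₖ || (k ∈ ms).
theorem pvLoopA_eq (ms : List Int) (v1 v2 v3 v4 v5 : Bool) :
    pvLoopA ms (PySem.Dict.mk [(1, v1), (2, v2), (3, v3), (4, v4), (5, v5)]) =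
      if ms.all (fun m => 0 < m && m ≤ 5) then
        some (PySem.Dict.mk [(1, v1 || ms.contains 1), (2, v2 || ms.contains 2),
          (3, v3 || ms.contains 3), (4, v4 || ms.contains 4), (5, v5 || ms.contains 5)])
      else none := by
  induction ms generalizing v1 v2 v3 v4 v5 with
  | nil => simp [pvLoopA]
  | cons m rest ih =>
      by_cases hm : 0 < m ∧ m ≤ 5
      · have h1 : (1:Int) ≤ m := hm.1
        have h5 : m ≤ 5 := hm.2
        have hins : (PySem.Dict.mk [(1, v1), (2, v2), (3, v3), (4, v4), (5, v5)]).insert m true =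
            PySem.Dict.mk [(1, v1 || decide (m = 1)), (2, v2 || decide (m = 2)),
              (3, v3 || decide (m = 3)), (4, v4 || decide (m = 4)), (5, v5 || decide (m = 5))] := by
          interval_cases m <;> simp [PySem.Dict.insert]
        simp only [pvLoopA, if_pos hm, hins, ih]
        have hc : ∀ k : Int, ((m :: rest).contains k) = (decide (m = k) || rest.contains k) := by
          intro k; simp [eq_comm]
        simp only [List.all_cons, hc, decide_eq_true hm.1, decide_eq_true hm.2, Bool.and_self,
          Bool.true_and]
        simp only [Bool.or_assoc]
      · simp only [pvLoopA, if_neg hm, List.all_cons]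
        have hfalse : (decide (0 < m) && decide (m ≤ 5)) = false := by
          rcases not_and_or.mp hm with h | h <;> simp <;> omega
        simp [hfalse]

-- When every member lies in 1..5, sorted(set(members)) is exactly the in-order
-- filter of [1,2,3,4,5] by membership.
theorem sorted_set_eq_filter (members : List Int)
    (hall : members.all (fun m => 0 < m && m ≤ 5) = true) :
    PySem.List.sorted (PySem.Set.ofList members) (fun x => x) false =
      ([1, 2, 3, 4, 5] : List Int).filter (fun k => members.contains k) := by
  apply PySem.List.sorted_eq_of_perm_of_pairwise_lt
  · rw [List.perm_ext_iff_of_nodup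
      ((by decide : ([1,2,3,4,5] : List Int).Nodup).filter _)
      (PySem.Set.nodup_ofList _)]
    intro a
    simp only [List.mem_filter, PySem.Set.mem_ofList, List.contains_iff_mem]
    constructor
    · exact fun h => h.2
    · intro h
      refine ⟨?_, h⟩
      have := List.all_eq_true.mp hall a h
      simp only [Bool.and_eq_true, decide_eq_true_eq] at this
      have h1 := this.1; have h2 := this.2
      interval_cases a <;> decide
  · exact (by decide : ([1,2,3,4,5] : List Int).Pairwise (· < ·)).filter _

theorem find_duo_trio_spec : Claim_equal_find_duo_trio := by
  intro members _
  unfold Spec_find_duo_trio find_duo_trio find_duo_trio_alt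
  have hof : PySem.Dict.ofList ([(1, false), (2, false), (3, false), (4, false), (5, false)] : List (Int × Bool)) =
      PySem.Dict.mk [(1, false), (2, false), (3, false), (4, false), (5, false)] := by decide
  rw [hof, pvLoopA_eq]
  have hmem : ∀ x : Int, x ∈ PySem.List.sorted (PySem.Set.ofList members) (fun x => x) false ↔
      x ∈ members := by
    intro x; rw [PySem.List.mem_sorted, PySem.Set.mem_ofList]
  have hany : ((PySem.List.sorted (PySem.Set.ofList members) (fun x => x) false).any
      (fun m => !(0 < m && m ≤ 5))) = members.any (fun m => !(0 < m && m ≤ 5)) := by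
    rcases h : members.any (fun m => !(0 < m && m ≤ 5)) with _ | _
    · rw [List.any_eq_false] at h ⊢
      intro x hx; exact h x ((hmem x).mp hx)
    · rw [List.any_eq_true] at h ⊢
      obtain ⟨x, hx, hb⟩ := h
      exact ⟨x, (hmem x).mpr hx, hb⟩
  have hiff : (members.all (fun m => 0 < m && m ≤ 5)) =
      !(members.any (fun m => !(0 < m && m ≤ 5))) := by
    rw [List.all_eq_not_any_not]
  by_cases h : members.any (fun m => !(0 < m && m ≤ 5)) = true
  · rw [hiff, h]
    simp only [hany, h, Bool.not_true, Bool.false_eq_true, if_false, if_true]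
  · have h' := eq_false_of_ne_true h
    rw [hiff, h']
    have hall : members.all (fun m => 0 < m && m ≤ 5) = true := by rw [hiff, h']; rfl
    simp only [Bool.not_false, hany, h', Bool.false_eq_true, if_false]
    rw [sorted_set_eq_filter members hall]
    by_cases h1 : (1:Int) ∈ members <;> by_cases h2 : (2:Int) ∈ members <;>
      by_cases h3 : (3:Int) ∈ members <;> by_cases h4 : (4:Int) ∈ members <;>
      by_cases h5 : (5:Int) ∈ members <;>
      simp [h1, h2, h3, h4, h5, List.filter, String.join, List.foldl]
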